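-- pv_equiv track=rewrite | github.com/Devansh09112002/CWSPO | cwspo_repo/src/cwspo/pipeline/build_pairs.py | _orientation_counts
-- ===== SOURCE A (Python) =====
-- from collections import Counter, defaultdict
-- from typing import Any
--
-- def _is_kept_status(status: str | None) -> bool:
--     return bool(status and status.startswith("kept"))
--
-- def _orientation_counts(decisions: list[dict[str, Any]]) -> dict[str, int]:
--     counts: Counter[str] = Counter()
--     for row in decisions:
--         if not _is_kept_status(row.get("final_status")):
--             continue
--         reason = row.get("orientation_reason") or "unknown"
--         counts[reason] += 1
--     return dict(sorted(counts.items()))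
-- ===== SOURCE B (Python) =====
-- def _is_kept_status(status):
--     return bool(status and status.startswith("kept"))
--
--
-- def _orientation_counts(decisions):
--     # Flatten to the kept rows' reasons, sort the whole list, then count
--     # adjacent equal runs in one scan (sort-then-group instead of Counter).
--     reasons = sorted(
--         row.get("orientation_reason") or "unknown"
--         for row in decisions
--         if _is_kept_status(row.get("final_status"))
--     )
--     out = {}
--     n = len(reasons)
--     i = 0
--     while i < n:
--         j = i + 1
--         while j < n and reasons[j] == reasons[i]:
--             j += 1
--         out[reasons[i]] = j - i
--         i = j
--     return out
-- ===== Notes on version B (the rewrite author's own statement) =====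
-- stated objective: alternative
-- what changed: Instead of hashing each kept row's reason into a Counter and sorting the distinct (key,count) items, B collects the flat list of kept reasons, sorts it, and counts adjacent equal runs in one index scan, emitting the dict in sorted-run order.
import Mathlib
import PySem

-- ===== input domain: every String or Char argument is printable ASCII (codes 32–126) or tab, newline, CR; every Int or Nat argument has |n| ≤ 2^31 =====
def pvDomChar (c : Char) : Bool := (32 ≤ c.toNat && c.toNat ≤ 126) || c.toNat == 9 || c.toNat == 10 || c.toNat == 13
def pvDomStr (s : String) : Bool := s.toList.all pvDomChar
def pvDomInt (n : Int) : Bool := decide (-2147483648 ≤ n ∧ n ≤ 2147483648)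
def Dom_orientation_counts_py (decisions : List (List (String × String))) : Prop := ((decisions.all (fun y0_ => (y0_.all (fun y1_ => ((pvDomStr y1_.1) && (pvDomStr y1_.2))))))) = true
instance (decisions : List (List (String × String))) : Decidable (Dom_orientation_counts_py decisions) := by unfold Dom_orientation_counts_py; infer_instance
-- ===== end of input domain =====

-- B sorts the flat list of kept reasons and counts adjacent equal runs in one scan,
-- instead of A's Counter over the rows followed by sorting the distinct items (objective: alternative).

-- ===== PORT A =====
-- shared helper: the Python helper _is_kept_status (identical in Source A and Source B)
def pvKept (status : Option String) : Bool :=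
  match status with
  | none => false
  | some s => (!(s = "")) && PySem.Str.startswith s "kept"

-- shared helper: row.get("orientation_reason") or "unknown"  (identical expression in Source A and Source B)
def pvReason (row : List (String × String)) : String :=
  match (PySem.Dict.mk row).get? "orientation_reason" with
  | none => "unknown"
  | some r => if r = "" then "unknown" else r

def orientation_counts_py (decisions : List (List (String × String))) : List (String × Int) :=
  let counts : PySem.Dict String Int :=
    decisions.foldl
      (fun d row =>
        if !(pvKept ((PySem.Dict.mk row).get? "final_status")) then d
        else d.modify (pvReason row) 0 (· + 1))
      PySem.Dict.empty
  PySem.List.sorted2 counts.items (fun p => p.1) (fun p => p.2)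

-- ===== PORT B =====
-- termination helper for the run-length scan
theorem pvRuns_dec {x : String} (xs : List String) :
    (xs.dropWhile (fun y => y == x)).length < xs.length + 1 :=
  Nat.lt_succ_of_le (List.length_dropWhile_le _ xs)

-- the two nested while loops of Source B: one run per outer step (j - i = 1 + length of the equal run)
def pvRuns : List String → List (String × Int)
  | [] => []
  | x :: xs =>
    (x, (1 + (xs.takeWhile (fun y => y == x)).length : Int)) ::
      pvRuns (xs.dropWhile (fun y => y == x))
termination_by l => l.length
decreasing_by exact pvRuns_dec xs

def orientation_counts_py_alt (decisions : List (List (String × String))) : List (String × Int) :=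
  let reasons :=
    PySem.List.sorted
      (decisions.filterMap (fun row =>
        if pvKept ((PySem.Dict.mk row).get? "final_status") then some (pvReason row) else none))
      (fun s => s)
  pvRuns reasons

-- ===== PRECONDITION & SPEC =====
def Spec_orientation_counts_py (decisions : List (List (String × String))) (out : List (String × Int)) : Prop := out = orientation_counts_py_alt decisions
instance (decisions : List (List (String × String))) (out : List (String × Int)) : Decidable (Spec_orientation_counts_py decisions out) := by unfold Spec_orientation_counts_py; infer_instance

-- ===== CLAIM (what is proved, stated in full; the proofs are below) =====
def Claim_equal_orientation_counts_py : Prop := ∀ (decisions : List (List (String × String))), Dom_orientation_counts_py decisions → Spec_orientation_counts_py decisions (orientation_counts_py decisions)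

-- ===== LEMMAS AND PROOFS =====

-- A's row loop is the Counter of the filtered reason list
theorem foldl_rows_eq_counter (ds : List (List (String × String))) :
    ∀ d : PySem.Dict String Int,
      ds.foldl
        (fun d row =>
          if !(pvKept ((PySem.Dict.mk row).get? "final_status")) then d
          else d.modify (pvReason row) 0 (· + 1)) d
      = (ds.filterMap (fun row =>
          if pvKept ((PySem.Dict.mk row).get? "final_status") then some (pvReason row) else none)).foldl
          (fun d x => d.modify x 0 (· + 1)) d := by
  induction ds with
  | nil => intro d; rfl
  | cons row t ih =>
    intro d
    cases hk : pvKept ((PySem.Dict.mk row).get? "final_status") with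
    | false =>
      simp only [List.foldl_cons, List.filterMap_cons, hk, Bool.not_false, if_true, if_false]
      simpa using ih d
    | true =>
      simp only [List.foldl_cons, List.filterMap_cons, hk, Bool.not_true, if_true, if_false]
      simpa using ih _

-- insertBy only looks at `before` on the inserted element and the accumulator
theorem insertBy_congr {α : Type} (P : α → Prop) (b b' : α → α → Bool)
    (h : ∀ a c, P a → P c → b a c = b' a c) :
    ∀ (x : α) (acc : List α), P x → (∀ y ∈ acc, P y) →
      PySem.List.insertBy b x acc = PySem.List.insertBy b' x acc := by
  intro x acc
  induction acc with
  | nil => intro _ _; rfl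
  | cons y ys ih =>
    intro hx hall
    simp only [PySem.List.insertBy]
    rw [h x y hx (hall y (by simp))]
    by_cases hb : b' x y = true
    · simp [hb]
    · simp [hb, ih hx (fun z hz => hall z (by simp [hz]))]

theorem foldl_insertBy_congr {α : Type} (P : α → Prop) (b b' : α → α → Bool)
    (h : ∀ a c, P a → P c → b a c = b' a c) :
    ∀ (xs acc : List α), (∀ y ∈ xs, P y) → (∀ y ∈ acc, P y) →
      xs.foldl (fun acc x => PySem.List.insertBy b x acc) acc
        = xs.foldl (fun acc x => PySem.List.insertBy b' x acc) acc := by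
  intro xs
  induction xs with
  | nil => intro acc _ _; rfl
  | cons x t ih =>
    intro acc hxs hacc
    simp only [List.foldl_cons]
    rw [insertBy_congr P b b' h x acc (hxs x (by simp)) hacc]
    exact ih _ (fun y hy => hxs y (by simp [hy]))
      (fun y hy => by
        rcases (PySem.List.mem_insertBy b' x y acc).mp hy with h1 | h1
        · exact h1 ▸ hxs x (by simp)
        · exact hacc y h1)

-- on a list of pairs whose second component is a function of the first,
-- Python's tuple sort is the sort by first component
theorem sorted2_eq_sorted_fst (xs : List (String × Int))
    (hfun : ∀ a c, a ∈ xs → c ∈ xs → a.1 = c.1 → a = c) :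
    PySem.List.sorted2 xs (fun p => p.1) (fun p => p.2)
      = PySem.List.sorted xs (fun p => p.1) := by
  show xs.foldl (fun acc x => PySem.List.insertBy _ x acc) []
      = xs.foldl (fun acc x => PySem.List.insertBy _ x acc) []
  apply foldl_insertBy_congr (fun p => p ∈ xs)
  · intro a c ha hc
    by_cases h1 : a.1 < c.1
    · simp [h1]
    · by_cases h2 : c.1 < a.1
      · simp [h1, h2]
      · have he : a = c := hfun a c ha hc (le_antisymm (not_lt.mp h2) (not_lt.mp h1))
        subst he
        simp [h1]
  · exact fun y hy => hy
  · simp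

-- PySem.Set.add set-fold: a prefix of elements already present is absorbed
theorem foldl_add_absorb {α : Type} [BEq α] [LawfulBEq α] (a : List α) :
    ∀ s : PySem.Set α, (∀ y ∈ a, s.contains y = true) →
      a.foldl PySem.Set.add s = s := by
  induction a with
  | nil => intro s _; rfl
  | cons y t ih =>
    intro s hall
    have hmem : y ∈ s := by simpa using hall y (by simp)
    have : PySem.Set.add s y = s := by
      simp [PySem.Set.add, hmem]
    simp only [List.foldl_cons, this]
    exact ih s (fun z hz => hall z (by simp [hz]))

theorem foldl_add_cons {α : Type} [BEq α] [LawfulBEq α] (b : List α) :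
    ∀ (x : α) (s : List α), x ∉ b →
      b.foldl PySem.Set.add (x :: s) = x :: b.foldl PySem.Set.add s := by
  induction b with
  | nil => intro x s _; rfl
  | cons e t ih =>
    intro x s hx
    have hne : e ≠ x := by intro h; exact hx (by simp [h])
    by_cases h : e ∈ s
    · simp only [List.foldl_cons]
      have h1 : PySem.Set.add (x :: s) e = x :: s := by
        simp [PySem.Set.add, hne, h]
      have h2 : PySem.Set.add s e = s := by simp [PySem.Set.add, h]
      rw [h1, h2]
      exact ih x s (fun hmem => hx (by simp [hmem]))
    · simp only [List.foldl_cons]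
      have h1 : PySem.Set.add (x :: s) e = x :: (s ++ [e]) := by
        simp [PySem.Set.add, hne, h]
      have h2 : PySem.Set.add s e = s ++ [e] := by simp [PySem.Set.add, h]
      rw [h1, h2]
      exact ih x (s ++ [e]) (fun hmem => hx (by simp [hmem]))

theorem ofList_run (x : String) (a b : List String)
    (ha : ∀ y ∈ a, y = x) (hb : x ∉ b) :
    PySem.Set.ofList (x :: a ++ b) = x :: PySem.Set.ofList b := by
  show (x :: a ++ b).foldl PySem.Set.add PySem.Set.empty = _
  simp only [List.cons_append, List.foldl_cons, List.foldl_append]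
  have h0 : PySem.Set.add PySem.Set.empty x = [x] := by rfl
  rw [h0]
  have h1 : a.foldl PySem.Set.add [x] = [x] := by
    apply foldl_add_absorb
    intro y hy
    simp [PySem.Set.contains, ha y hy]
  rw [h1]
  exact foldl_add_cons b x [] hb

-- the head of a non-empty dropWhile fails the predicate
theorem dropWhile_head_false {α : Type} (p : α → Bool) :
    ∀ (l : List α) (y : α) (t : List α), l.dropWhile p = y :: t → p y = false := by
  intro l
  induction l with
  | nil => intro y t h; simp [List.dropWhile] at h
  | cons a l ih =>
    intro y t h
    by_cases hp : p a = true
    · rw [List.dropWhile_cons_of_pos hp] at h; exact ih y t h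
    · rw [List.dropWhile_cons_of_neg (by simpa using hp)] at h
      cases h; simpa using hp

-- run-length counting of a ≤-sorted list is the counts over its first-occurrence dedup
theorem pvRuns_eq (l : List String) (h : l.Pairwise (· ≤ ·)) :
    pvRuns l = (PySem.Set.ofList l).map (fun k => (k, (l.count k : Int))) := by
  induction l using pvRuns.induct with
  | case1 => simp [pvRuns]
  | case2 x xs ih =>
    have hsplit : xs.takeWhile (fun y => y == x) ++ xs.dropWhile (fun y => y == x) = xs :=
      List.takeWhile_append_dropWhile
    have hrunx : ∀ y ∈ xs.takeWhile (fun y => y == x), y = x := by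
      intro y hy
      have := List.mem_takeWhile_imp hy
      simpa using this
    have hxle : ∀ y ∈ xs, x ≤ y := (List.pairwise_cons.mp h).1
    have hrestp : (xs.dropWhile (fun y => y == x)).Pairwise (· ≤ ·) :=
      List.Pairwise.sublist (List.dropWhile_sublist _) (List.pairwise_cons.mp h).2
    have hxnrest : x ∉ xs.dropWhile (fun y => y == x) := by
      intro hmem
      cases hr : xs.dropWhile (fun y => y == x) with
      | nil => rw [hr] at hmem; simp at hmem
      | cons y t =>
        have hy : (fun y => y == x) y = false := dropWhile_head_false _ xs y t hr
        have hyx : y ≠ x := by simpa using hy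
        rw [hr] at hmem
        rcases List.mem_cons.mp hmem with h1 | h1
        · exact hyx h1.symm
        · -- x occurs after y in the rest, but y ≤ every later element and x ≤ y, y ≠ x
          have hyle : ∀ z ∈ t, y ≤ z := (List.pairwise_cons.mp (hr ▸ hrestp)).1
          have hymem : y ∈ xs := by
            have : y ∈ xs.dropWhile (fun y => y == x) := hr ▸ List.mem_cons_self
            exact hsplit ▸ List.mem_append.mpr (Or.inr this)
          exact hyx (le_antisymm (hyle x h1) (hxle y hymem))
    have hxxs : x :: xs = x :: xs.takeWhile (fun y => y == x) ++ xs.dropWhile (fun y => y == x) := by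
      rw [List.cons_append, hsplit]
    have hofl : PySem.Set.ofList (x :: xs)
        = x :: PySem.Set.ofList (xs.dropWhile (fun y => y == x)) := by
      rw [hxxs]; exact ofList_run x _ _ hrunx hxnrest
    have hcx : (x :: xs).count x = 1 + (xs.takeWhile (fun y => y == x)).length := by
      have hcr : (xs.takeWhile (fun y => y == x)).count x
          = (xs.takeWhile (fun y => y == x)).length :=
        List.count_eq_length.mpr (fun y hy => ((hrunx y hy).symm : x = y))
      have hcrest : (xs.dropWhile (fun y => y == x)).count x = 0 :=
        List.count_eq_zero.mpr hxnrest
      rw [hxxs, List.cons_append, List.count_cons_self, List.count_append, hcr, hcrest]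
      omega
    have hck : ∀ k ∈ PySem.Set.ofList (xs.dropWhile (fun y => y == x)),
        (x :: xs).count k = (xs.dropWhile (fun y => y == x)).count k := by
      intro k hk
      have hkrest : k ∈ xs.dropWhile (fun y => y == x) := (PySem.Set.mem_ofList _ k).mp hk
      have hkx : k ≠ x := fun hh => hxnrest (hh ▸ hkrest)
      have hcr : (xs.takeWhile (fun y => y == x)).count k = 0 :=
        List.count_eq_zero.mpr (fun hmem => hkx (hrunx k hmem))
      rw [hxxs, List.cons_append, List.count_cons_of_ne (Ne.symm hkx), List.count_append, hcr]
      omega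
    rw [show pvRuns (x :: xs)
        = (x, (1 + (xs.takeWhile (fun y => y == x)).length : Int)) ::
            pvRuns (xs.dropWhile (fun y => y == x)) from by rw [pvRuns],
      hofl, List.map_cons]
    congr 1
    · rw [hcx]; simp
    · rw [ih hrestp]
      apply List.map_congr_left
      intro k hk
      simp [hck k hk]

-- a first-occurrence dedup of a ≤-sorted list is <-sorted
theorem ofList_pairwise_lt_of_sorted (l : List String) (h : l.Pairwise (· ≤ ·)) :
    (PySem.Set.ofList l).Pairwise (· < ·) := by
  induction l with
  | nil => simp [PySem.Set.ofList]
  | cons x xs ih =>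
    rw [PySem.Set.ofList_cons]
    apply List.pairwise_cons.mpr
    constructor
    · intro y hy
      have hmem : y ∈ PySem.Set.ofList xs := List.mem_of_mem_filter hy
      have hyx : ¬(y == x) = true := by
        have := List.of_mem_filter hy
        simpa using this
      have hyne : y ≠ x := by simpa using hyx
      have hle : x ≤ y := (List.pairwise_cons.mp h).1 y ((PySem.Set.mem_ofList xs y).mp hmem)
      exact lt_of_le_of_ne hle (fun he => hyne he.symm)
    · exact (ih (List.pairwise_cons.mp h).2).filter _

-- ===== VERDICT (by name: the statement is the Claim_ definition above) =====
theorem orientation_counts_py_spec : Claim_equal_orientation_counts_py := by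
  intro decisions _
  unfold Spec_orientation_counts_py orientation_counts_py orientation_counts_py_alt
  set kf : List (String × String) → Option String := fun row =>
    if pvKept ((PySem.Dict.mk row).get? "final_status") then some (pvReason row) else none with hkf
  set reasons0 : List String := decisions.filterMap kf with hreasons0
  -- A side: the loop builds Counter(reasons0)
  rw [foldl_rows_eq_counter, ← PySem.Dict.counter_eq_foldl]
  set f : String → String × Int := fun k => (k, (reasons0.count k : Int)) with hf
  have hitems : (PySem.Dict.counter reasons0).items = (PySem.Set.ofList reasons0).map f :=
    PySem.Dict.items_counter reasons0
  -- target form: sorted distinct keys with their counts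
  set target : List (String × Int) :=
    (PySem.List.sorted (PySem.Set.ofList reasons0) (fun s => s)).map f with htarget
  -- Step 1: Python's tuple sort of the items is the sort by key
  have hstep1 :
      PySem.List.sorted2 (PySem.Dict.counter reasons0).items (fun p => p.1) (fun p => p.2)
        = PySem.List.sorted (PySem.Dict.counter reasons0).items (fun p => p.1) := by
    apply sorted2_eq_sorted_fst
    intro a c ha hc h1
    rw [hitems] at ha hc
    rcases List.mem_map.mp ha with ⟨k, _, hk⟩
    rcases List.mem_map.mp hc with ⟨k', _, hk'⟩
    have hak : a.1 = k := by rw [← hk]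
    have hck : c.1 = k' := by rw [← hk']
    have : k = k' := by rw [← hak, ← hck, h1]
    rw [← hk, ← hk', this]
  -- Step 2: sorting the items by key gives the counts over the sorted distinct reasons
  have hstep2 :
      PySem.List.sorted (PySem.Dict.counter reasons0).items (fun p => p.1) = target := by
    apply PySem.List.sorted_eq_of_perm_of_pairwise_lt
    · rw [hitems, htarget]
      exact (PySem.List.sorted_perm (PySem.Set.ofList reasons0) (fun s => s) false).map f
    · rw [htarget]
      exact List.Pairwise.map f (fun a b hab => hab) (PySem.List.sorted_ofList_pairwise_lt reasons0)
  -- Step 3: the run-length scan of the sorted reason list gives the same counts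
  have hstep3 :
      pvRuns (PySem.List.sorted reasons0 (fun s => s)) = target := by
    set l : List String := PySem.List.sorted reasons0 (fun s => s) with hl
    have hlp : l.Pairwise (· ≤ ·) := PySem.List.sorted_pairwise reasons0 (fun s => s)
    rw [pvRuns_eq l hlp]
    have hofl : PySem.Set.ofList l = PySem.List.sorted (PySem.Set.ofList reasons0) (fun s => s) := by
      symm
      apply PySem.List.sorted_eq_of_perm_of_pairwise_lt
      · apply (List.perm_ext_iff_of_nodup (PySem.Set.nodup_ofList l)
          (PySem.Set.nodup_ofList reasons0)).mpr
        intro a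
        rw [PySem.Set.mem_ofList, PySem.Set.mem_ofList, hl,
          PySem.List.mem_sorted]
      · exact ofList_pairwise_lt_of_sorted l hlp
    rw [hofl, htarget]
    apply List.map_congr_left
    intro k _
    have : l.count k = reasons0.count k :=
      (PySem.List.sorted_perm reasons0 (fun s => s) false).count_eq k
    simp [hf, this]
  rw [hstep1, hstep2, ← hstep3]
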